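-- pv_equiv track=rewrite | github.com/devbisme/KiPart | kipart/common.py | read_symbol_rows
-- ===== SOURCE A (Python) =====
-- def read_symbol_rows(rows):
--     """
--     Group CSV rows into symbols based on part names and blank lines.
--
--     Each symbol consists of a part name, optional properties, a header, and pin data.
--
--     Args:
--         rows (list of list): Raw CSV rows from the input file.
--
--     Returns:
--         list of list: List of symbol data, where each item is a list of rows for a symbol.
--
--     Raises:
--         ValueError: If no valid symbols are found.
--     """
--     symbols = []
--
--     current_symbol_rows = []
--     for row in rows:
--         if not row or all(cell.strip() == '' for cell in row):
--             if current_symbol_rows: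
--                 symbols.append(current_symbol_rows)
--             current_symbol_rows = []
--         else:
--             current_symbol_rows.append(row)
--
--     if current_symbol_rows:
--         symbols.append(current_symbol_rows)
--
--     if not symbols:
--         raise ValueError("No valid symbols found in input file")
--
--     return symbols
-- ===== SOURCE B (Python) =====
-- def read_symbol_rows(rows):
--     def is_data(row):
--         return bool(row) and not all(cell.strip() == '' for cell in row)
--
--     symbols = []
--     i, n = 0, len(rows)
--     while i < n:
--         if is_data(rows[i]):
--             j = i
--             while j < n and is_data(rows[j]):
--                 j += 1
--             symbols.append(rows[i:j])
--             i = j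
--         else:
--             i += 1
--
--     if not symbols:
--         raise ValueError("No valid symbols found in input file")
--
--     return symbols
-- ===== Notes on version B (the rewrite author's own statement) =====
-- stated objective: alternative
-- what changed: Replaces A's flush-on-blank accumulator (append to current group, emit it on each blank row and once more after the loop) with a two-pointer run scanner that skips blank rows and slices out each maximal run of data rows directly.
import Mathlib
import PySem

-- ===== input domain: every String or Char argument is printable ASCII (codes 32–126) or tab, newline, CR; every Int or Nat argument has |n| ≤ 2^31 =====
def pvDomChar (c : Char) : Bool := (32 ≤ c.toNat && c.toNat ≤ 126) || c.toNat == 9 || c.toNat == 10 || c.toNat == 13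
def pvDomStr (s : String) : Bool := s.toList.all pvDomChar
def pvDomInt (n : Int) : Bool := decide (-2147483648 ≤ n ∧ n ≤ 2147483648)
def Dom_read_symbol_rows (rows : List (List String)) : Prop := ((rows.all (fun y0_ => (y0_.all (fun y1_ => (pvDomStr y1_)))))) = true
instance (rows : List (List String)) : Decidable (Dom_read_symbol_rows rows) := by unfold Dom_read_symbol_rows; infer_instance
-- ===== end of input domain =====

-- B replaces A's flush-on-blank accumulator with a run scanner (skip blank rows, slice out each
-- maximal run of data rows); objective: alternative decomposition, same O(n) cost.


-- ===== PORT A =====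
-- `not row or all(cell.strip() == '' for cell in row)`
def pvBlankA (row : List String) : Bool :=
  row.isEmpty || row.all (fun cell => PySem.Str.strip cell == "")

-- the for-loop of A, carrying (symbols, current_symbol_rows); after the loop the last group is flushed
def pvGoA (rows : List (List String)) (symbols : List (List (List String)))
    (cur : List (List String)) : List (List (List String)) :=
  match rows with
  | [] => if cur.isEmpty then symbols else symbols ++ [cur]
  | row :: rest =>
      if pvBlankA row then
        if cur.isEmpty then pvGoA rest symbols [] else pvGoA rest (symbols ++ [cur]) []
      else
        pvGoA rest symbols (cur ++ [row])

-- on the inputs excluded by Pre_ the Python raises ValueError; the port returns [] there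
def read_symbol_rows (rows : List (List String)) : List (List (List String)) :=
  pvGoA rows [] []

-- ===== PORT B =====
-- `bool(row) and not all(cell.strip() == '' for cell in row)`
def pvIsDataB (row : List String) : Bool :=
  !row.isEmpty && !(row.all (fun cell => PySem.Str.strip cell == ""))

-- the outer while loop of B: skip a non-data row, or take the maximal data run rows[i:j] and
-- continue after it (takeWhile/dropWhile are the inner `while j < n and is_data` scan + slice)
def pvGoB (rows : List (List String)) : List (List (List String)) :=
  match rows with
  | [] => []
  | row :: rest =>
      if pvIsDataB row then
        (row :: rest.takeWhile pvIsDataB) :: pvGoB (rest.dropWhile pvIsDataB)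
      else
        pvGoB rest
termination_by rows.length
decreasing_by
  · have := List.length_dropWhile_le pvIsDataB rest
    simp; omega
  · simp

def read_symbol_rows_alt (rows : List (List String)) : List (List (List String)) :=
  pvGoB rows

-- ===== PRECONDITION & SPEC =====
-- Pre_ excludes exactly the inputs where the Python A raises ValueError ("No valid symbols"):
-- those with no data row (every row empty or all-whitespace cells); B raises the same error there.
def Pre_read_symbol_rows (rows : List (List String)) : Prop :=
  ∃ row ∈ rows, row ≠ [] ∧ ∃ cell ∈ row, PySem.Str.strip cell ≠ ""
instance (rows : List (List String)) : Decidable (Pre_read_symbol_rows rows) := by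
  unfold Pre_read_symbol_rows; infer_instance

def pvWitness_read_symbol_rows : List (List String) := [["X1", "pin"]]

def Spec_read_symbol_rows (rows : List (List String)) (out : List (List (List String))) : Prop := out = read_symbol_rows_alt rows
instance (rows : List (List String)) (out : List (List (List String))) : Decidable (Spec_read_symbol_rows rows out) := by unfold Spec_read_symbol_rows; infer_instance

-- ===== CLAIM (what is proved, stated in full; the proofs are below) =====
def Claim_equal_read_symbol_rows : Prop := ∀ (rows : List (List String)), Dom_read_symbol_rows rows → Pre_read_symbol_rows rows → Spec_read_symbol_rows rows (read_symbol_rows rows)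

-- ===== LEMMAS AND PROOFS =====

theorem pvIsData_eq_not_blank (row : List String) : pvIsDataB row = !pvBlankA row := by
  unfold pvIsDataB pvBlankA
  cases row <;> simp

-- the accumulated symbols are simply prepended to the rest of the run
theorem pvGoA_append (rows : List (List String)) (s : List (List (List String)))
    (cur : List (List String)) : pvGoA rows s cur = s ++ pvGoA rows [] cur := by
  induction rows generalizing s cur with
  | nil => simp [pvGoA]; split <;> simp
  | cons row rest ih =>
      simp only [pvGoA]
      split
      · split
        · exact ih s []
        · rw [ih (s ++ [cur]) [], ih ([] ++ [cur]) []]; simp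
      · exact ih s (cur ++ [row])

-- A's state (cur = the data run read so far) versus B's run scanner
theorem pvGoA_eq_goB (rows : List (List String)) (cur : List (List String)) :
    pvGoA rows [] cur =
      if cur.isEmpty then pvGoB rows
      else (cur ++ rows.takeWhile pvIsDataB) :: pvGoB (rows.dropWhile pvIsDataB) := by
  induction rows generalizing cur with
  | nil =>
      simp only [pvGoA]
      split <;> simp_all [pvGoB]
  | cons row rest ih =>
      have hd := pvIsData_eq_not_blank row
      by_cases hb : pvBlankA row = true
      · have hdata : pvIsDataB row = false := by rw [hd, hb]; rfl
        by_cases hc : cur.isEmpty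
        · simp only [pvGoA, hb, hc, ite_true]
          rw [ih []]
          simp [pvGoB, hdata]
        · simp only [pvGoA, hb, hc]
          simp only [Bool.false_eq_true, if_false]
          rw [pvGoA_append rest ([] ++ [cur]) [], ih []]
          simp [pvGoB, hdata]
      · have hdata : pvIsDataB row = true := by rw [hd]; simp [hb]
        simp only [pvGoA, hb]
        rw [ih (cur ++ [row])]
        by_cases hc : cur.isEmpty
        · simp only [List.isEmpty_iff] at hc
          simp [hc, pvGoB, hdata]
        · simp at hc
          simp [hc, hdata]

-- ===== VERDICT (by name: the statement is the Claim_ definition above) =====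
theorem read_symbol_rows_spec : Claim_equal_read_symbol_rows := by
  intro rows _ _
  unfold Spec_read_symbol_rows read_symbol_rows read_symbol_rows_alt
  rw [pvGoA_eq_goB]
  simp
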